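-- pv_equiv track=rewrite | github.com/thelori91/TWEB-2021-2022 | Algorithm.py | correct_length
-- ===== SOURCE A (Python) =====
-- def correct_length(p):
--     l = len(p)
--     r = 0
--     v = True
--     while (r < l and v == True):
--         if len(p[0]) == len(p[r]):
--              v = True
--              r +=1
--         else:
--             v = False
--     return v
-- ===== SOURCE B (Python) =====
-- def correct_length(p):
--     return len(set(map(len, p))) <= 1
-- ===== Notes on version B (the rewrite author's own statement) =====
-- stated objective: idiomatic
-- what changed: Replaces the early-exit while loop comparing each element's length to p[0]'s with a one-liner that collects all element lengths into a set and checks it has at most one distinct value.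
import Mathlib
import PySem

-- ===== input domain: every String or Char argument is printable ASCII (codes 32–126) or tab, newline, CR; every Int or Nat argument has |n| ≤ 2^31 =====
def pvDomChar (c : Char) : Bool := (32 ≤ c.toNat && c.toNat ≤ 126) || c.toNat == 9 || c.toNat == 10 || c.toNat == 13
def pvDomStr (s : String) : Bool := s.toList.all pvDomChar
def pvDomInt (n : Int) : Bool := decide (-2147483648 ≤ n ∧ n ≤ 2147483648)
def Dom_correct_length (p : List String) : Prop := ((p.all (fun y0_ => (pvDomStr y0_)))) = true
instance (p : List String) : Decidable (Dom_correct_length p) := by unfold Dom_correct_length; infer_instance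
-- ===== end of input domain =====

-- B replaces A's early-exit while loop (compare every element's length to p[0]'s) with the
-- idiomatic one-liner len(set(map(len, p))) <= 1: collect the distinct lengths and check
-- there is at most one. Equivalence of return values is proved for all inputs (both total).


-- ===== PORT A =====
-- while (r < l and v == True): if len(p[0]) == len(p[r]): v = True; r += 1 else: v = False
def pvLoopA (p : List String) (l r : Nat) (v : Bool) : Bool :=
  if h : r < l ∧ v = true then
    match PySem.List.pyGet? p 0, PySem.List.pyGet? p (r : Int) with
    | some a, some b =>
        if PySem.Str.len a == PySem.Str.len b then
          pvLoopA p l (r + 1) true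
        else
          pvLoopA p l r false
    | _, _ => false   -- unreachable: the loop only runs with r < l = len p (IndexError never occurs)
  else v
termination_by (l - r) + (if v then 1 else 0)
decreasing_by
  all_goals (obtain ⟨h1, h2⟩ := h; subst h2; simp; try omega)

def correct_length (p : List String) : Bool :=
  pvLoopA p p.length 0 true

-- ===== PORT B =====
-- return len(set(map(len, p))) <= 1
def correct_length_alt (p : List String) : Bool :=
  decide (PySem.Set.len (PySem.Set.ofList (p.map PySem.Str.len)) ≤ 1)

-- ===== PRECONDITION & SPEC =====
def Spec_correct_length (p : List String) (out : Bool) : Prop := out = correct_length_alt p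
instance (p : List String) (out : Bool) : Decidable (Spec_correct_length p out) := by unfold Spec_correct_length; infer_instance

-- ===== CLAIM (what is proved, stated in full; the proofs are below) =====
def Claim_equal_correct_length : Prop := ∀ (p : List String), Dom_correct_length p → Spec_correct_length p (correct_length p)

-- ===== LEMMAS AND PROOFS =====

-- any two members of a list of length ≤ 1 coincide
lemma pv_mem_len_le_one {α : Type} {S : List α} (h : S.length ≤ 1) {a b : α}
    (ha : a ∈ S) (hb : b ∈ S) : a = b := by
  match S with
  | [] => cases ha
  | [x] => simp_all
  | x :: y :: S => simp at h

-- set(x::xs) is the singleton {x} when every element of xs equals x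
lemma pv_foldl_add_const {α : Type} [BEq α] [LawfulBEq α] (x : α) :
    ∀ ys : List α, (∀ y ∈ ys, y = x) → List.foldl PySem.Set.add [x] ys = [x]
  | [], _ => rfl
  | y :: ys, h => by
      have hx : y = x := h y (by simp)
      subst hx
      have hadd : PySem.Set.add [y] y = [y] := by simp [PySem.Set.add, PySem.Set.contains]
      rw [List.foldl_cons, hadd]
      exact pv_foldl_add_const y ys (fun z hz => h z (by simp [hz]))

-- set(x::xs) is the singleton {x} when every element of xs equals x
lemma pv_ofList_const {α : Type} [BEq α] [LawfulBEq α] (x : α) (xs : List α)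
    (h : ∀ y ∈ xs, y = x) : PySem.Set.ofList (x :: xs) = [x] := by
  have h0 : PySem.Set.ofList (x :: xs) = List.foldl PySem.Set.add (PySem.Set.add PySem.Set.empty x) xs := rfl
  have h1 : PySem.Set.add (PySem.Set.empty (α := α)) x = [x] := by
    simp [PySem.Set.add, PySem.Set.contains, PySem.Set.empty]
  rw [h0, h1, pv_foldl_add_const x xs h]

-- B's port returns true exactly when every element's length equals the head's
lemma pv_alt_iff (hd : String) (tl : List String) :
    correct_length_alt (hd :: tl) = true ↔
      ∀ s ∈ tl, PySem.Str.len s = PySem.Str.len hd := by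
  unfold correct_length_alt
  rw [decide_eq_true_iff]
  constructor
  · intro h s hs
    have hlen : (PySem.Set.ofList ((hd :: tl).map PySem.Str.len)).length ≤ 1 := by
      simpa [PySem.Set.len] using h
    exact pv_mem_len_le_one hlen
      ((PySem.Set.mem_ofList _ _).mpr (List.mem_map.mpr ⟨s, List.mem_cons_of_mem _ hs, rfl⟩))
      ((PySem.Set.mem_ofList _ _).mpr (List.mem_map.mpr ⟨hd, by simp, rfl⟩))
  · intro h
    have : PySem.Set.ofList ((hd :: tl).map PySem.Str.len) = [PySem.Str.len hd] := by
      rw [List.map_cons]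
      exact pv_ofList_const _ _ (by intro y hy; obtain ⟨s, hs, rfl⟩ := List.mem_map.mp hy; exact h s hs)
    rw [this]
    simp [PySem.Set.len]

-- A's loop, started at index r with v = True, checks all remaining lengths against p[0]'s
lemma pv_loopA_eq (hd : String) (tl : List String) :
    ∀ n r, (hd :: tl).length - r = n →
      pvLoopA (hd :: tl) (hd :: tl).length r true =
        ((hd :: tl).drop r).all (fun s => PySem.Str.len s == PySem.Str.len hd) := by
  intro n
  induction n with
  | zero =>
    intro r hr
    have hge : (hd :: tl).length ≤ r := by omega
    rw [pvLoopA]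
    rw [dif_neg (fun hc => absurd hc.1 (Nat.not_lt_of_le hge))]
    rw [List.drop_eq_nil_of_le hge]
    simp
  | succ n ih =>
    intro r hr
    have hlt : r < (hd :: tl).length := by omega
    have h0 : PySem.List.pyGet? (hd :: tl) 0 = some hd := by
      simp
    have hrget : PySem.List.pyGet? (hd :: tl) (r : Int) = some ((hd :: tl)[r]'hlt) := by
      rw [PySem.List.pyGet?_natCast]
      exact List.getElem?_eq_getElem hlt
    have hdrop : (hd :: tl).drop r = (hd :: tl)[r]'hlt :: (hd :: tl).drop (r + 1) :=
      (List.drop_eq_getElem_cons hlt)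
    rw [pvLoopA]
    rw [dif_pos ⟨hlt, rfl⟩, h0, hrget]
    change (if PySem.Str.len hd == PySem.Str.len ((hd :: tl)[r]'hlt) then
        pvLoopA (hd :: tl) (hd :: tl).length (r + 1) true
      else pvLoopA (hd :: tl) (hd :: tl).length r false) = _
    by_cases hEq : PySem.Str.len hd = PySem.Str.len ((hd :: tl)[r]'hlt)
    · rw [if_pos (by simpa using hEq), ih (r + 1) (by omega), hdrop, List.all_cons]
      have hfe : (PySem.Str.len ((hd :: tl)[r]'hlt) == PySem.Str.len hd) = true := by
        simp only [beq_iff_eq]; exact hEq.symm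
      rw [hfe, Bool.true_and]
    · rw [if_neg (by simpa using hEq)]
      rw [pvLoopA]
      rw [dif_neg (by simp : ¬((r < (hd :: tl).length) ∧ (false = true)))]
      rw [hdrop, List.all_cons]
      have hfe : (PySem.Str.len ((hd :: tl)[r]'hlt) == PySem.Str.len hd) = false := by
        simp only [beq_eq_false_iff_ne]
        exact fun hc => hEq hc.symm
      rw [hfe, Bool.false_and]

-- ===== VERDICT (by name: the statement is the Claim_ definition above) =====
theorem correct_length_spec : Claim_equal_correct_length := by
  intro p _
  unfold Spec_correct_length
  cases p with
  | nil =>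
    unfold correct_length
    rw [pvLoopA]
    simp [correct_length_alt, PySem.Set.ofList, PySem.Set.empty, PySem.Set.len]
  | cons hd tl =>
    have hA : correct_length (hd :: tl) = true ↔
        ∀ s ∈ tl, PySem.Str.len s = PySem.Str.len hd := by
      unfold correct_length
      rw [pv_loopA_eq hd tl ((hd :: tl).length - 0) 0 rfl]
      simp [List.all_cons, List.all_eq_true]
    rw [Bool.eq_iff_iff, hA, pv_alt_iff]
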